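-- pv_equiv track=rewrite | github.com/K-ple/Algorithms_Judge | 프로그래머스/0/181834. l로 만들기/l로 만들기.py | solution
-- ===== SOURCE A (Python) =====
-- def solution(myString):
--     lowl = ['a','b','c','d','e','f','g','h','i','j','k']
--     answer = ''
--     for i in myString:
--         if i in lowl:
--             answer += 'l'
--         else:
--             answer += i
--     return answer
-- ===== SOURCE B (Python) =====
-- def solution(myString):
--     for c in 'abcdefghijk':
--         myString = myString.replace(c, 'l')
--     return myString
-- ===== Notes on version B (the rewrite author's own statement) =====
-- stated objective: faster
-- what changed: B makes eleven staged whole-string replace passes (myString = myString.replace(c, 'l') for each c in 'abcdefghijk'), instead of A's single per-character loop testing membership in a list and concatenating onto an accumulator.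
import Mathlib
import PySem

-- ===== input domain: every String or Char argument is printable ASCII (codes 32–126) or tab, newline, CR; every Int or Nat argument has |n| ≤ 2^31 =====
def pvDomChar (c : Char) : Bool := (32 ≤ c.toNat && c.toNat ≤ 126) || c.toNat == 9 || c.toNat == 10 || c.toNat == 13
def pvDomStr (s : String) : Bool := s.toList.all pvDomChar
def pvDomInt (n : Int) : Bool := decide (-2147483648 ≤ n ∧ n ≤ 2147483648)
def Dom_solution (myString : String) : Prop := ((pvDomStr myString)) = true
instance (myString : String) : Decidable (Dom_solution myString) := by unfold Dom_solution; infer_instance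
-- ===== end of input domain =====

-- B replaces the chars 'a'..'k' by 'l' in eleven staged whole-string replace passes instead of A's single per-character membership-test loop.


-- ===== PORT A =====
-- A: loop over the characters, append 'l' if the char is in the list lowl, else the char itself.
def solution (myString : String) : String :=
  let lowl : List Char := ['a','b','c','d','e','f','g','h','i','j','k']
  let answer := ""
  myString.toList.foldl
    (fun answer i => if i ∈ lowl then answer ++ "l" else answer ++ String.ofList [i]) answer

-- ===== PORT B =====
-- B: for each c in 'abcdefghijk', one whole-string replace pass myString = myString.replace(c, 'l').
def solution_alt (myString : String) : String :=
  ("abcdefghijk".toList).foldl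
    (fun s c => PySem.Str.replace s (String.ofList [c]) "l") myString

-- ===== PRECONDITION & SPEC =====
def Spec_solution (myString : String) (out : String) : Prop := out = solution_alt myString
instance (myString : String) (out : String) : Decidable (Spec_solution myString out) := by unfold Spec_solution; infer_instance

-- ===== CLAIM (what is proved, stated in full; the proofs are below) =====
def Claim_equal_solution : Prop := ∀ (myString : String), Dom_solution myString → Spec_solution myString (solution myString)

-- ===== LEMMAS AND PROOFS =====

-- a single-character replace pass is the per-character map
theorem replace_go_single (c0 : Char) (l acc : List Char) (fuel : Nat) (h : l.length ≤ fuel) :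
    PySem.Chars.replace.go [c0] ['l'] fuel l acc
      = acc.reverse ++ l.map (fun c => if c = c0 then 'l' else c) := by
  induction l generalizing acc fuel with
  | nil =>
    cases fuel <;> simp [PySem.Chars.replace.go]
  | cons c t ih =>
    cases fuel with
    | zero => simp at h
    | succ fuel =>
      simp only [List.length_cons, Nat.succ_le_succ_iff] at h
      by_cases hc : c = c0
      · subst hc
        simp [PySem.Chars.replace.go, List.isPrefixOf, ih _ _ h]
      · have : List.isPrefixOf [c0] (c :: t) = false := by
          simp [List.isPrefixOf]; exact fun h' => (hc h'.symm).elim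
        simp [PySem.Chars.replace.go, this, ih _ _ h, hc]

theorem replace_single (c0 : Char) (l : List Char) :
    PySem.Chars.replace l [c0] ['l'] = l.map (fun c => if c = c0 then 'l' else c) := by
  simp [PySem.Chars.replace, replace_go_single c0 l [] l.length le_rfl]

-- folding the per-character step over a list of targets
theorem foldl_step (cs : List Char) (x : Char) :
    cs.foldl (fun y c => if y = c then 'l' else y) x = if x ∈ cs then 'l' else x := by
  induction cs generalizing x with
  | nil => simp
  | cons c cs ih =>
    by_cases hx : x = c
    · subst hx
      simp only [List.foldl, List.mem_cons, true_or, if_pos]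
      rw [ih]; split <;> rfl
    · simp [List.foldl, hx, ih]

theorem foldl_replace (cs : List Char) (s : List Char) :
    cs.foldl (fun l c => l.map (fun x => if x = c then 'l' else x)) s
      = s.map (fun x => if x ∈ cs then 'l' else x) := by
  induction cs generalizing s with
  | nil => simp
  | cons c cs ih =>
    simp only [List.foldl, ih, List.map_map]
    apply List.map_congr_left
    intro x _
    simp only [Function.comp, List.mem_cons]
    by_cases hx : x = c
    · subst hx
      rw [if_pos rfl]
      have : cs.foldl (fun y c => if y = c then 'l' else y) 'l' = 'l' := by
        rw [foldl_step]; split <;> rfl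
      simp only [true_or, if_pos]
      by_cases h' : 'l' ∈ cs <;> simp [h']
    · rw [if_neg hx]
      by_cases h' : x ∈ cs <;> simp [h', hx]

-- A's fold builds the same map
theorem solution_fold (l : List Char) (acc : List Char) :
    (l.foldl (fun answer i =>
        if i ∈ (['a','b','c','d','e','f','g','h','i','j','k'] : List Char)
        then answer ++ "l" else answer ++ String.ofList [i]) (String.ofList acc))
    = String.ofList (acc ++ l.map (fun c =>
        if c ∈ (['a','b','c','d','e','f','g','h','i','j','k'] : List Char) then 'l' else c)) := by
  induction l generalizing acc with
  | nil => simp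
  | cons c t ih =>
    simp only [List.foldl, List.map]
    by_cases h : c ∈ (['a','b','c','d','e','f','g','h','i','j','k'] : List Char)
    · rw [if_pos h, show ("l" : String) = String.ofList ['l'] from rfl,
          ← String.ofList_append, ih]
      simp [h]
    · rw [if_neg h, ← String.ofList_append, ih]
      simp [h]

-- B on char lists: the staged replace passes
theorem solution_alt_chars (s : String) :
    solution_alt s
      = String.ofList (("abcdefghijk".toList).foldl
          (fun l c => l.map (fun x => if x = c then 'l' else x)) s.toList) := by
  unfold solution_alt
  have step : ∀ (t : String) (c : Char),
      PySem.Str.replace t (String.ofList [c]) "l"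
        = String.ofList (t.toList.map (fun x => if x = c then 'l' else x)) := by
    intro t c
    simp [PySem.Str.replace, replace_single]
  generalize "abcdefghijk".toList = cs
  induction cs generalizing s with
  | nil => simp
  | cons c cs ih =>
    rw [List.foldl_cons, step, ih, List.foldl_cons]
    simp

-- ===== VERDICT (by name: the statement is the Claim_ definition above) =====
theorem solution_spec : Claim_equal_solution := by
  intro s _
  unfold Spec_solution solution
  simp only []
  have hcs : ("abcdefghijk".toList) = (['a','b','c','d','e','f','g','h','i','j','k'] : List Char) := by
    decide
  rw [solution_alt_chars, foldl_replace, hcs,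
      show ("" : String) = String.ofList [] from rfl, solution_fold, List.nil_append]
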